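-- pv_equiv track=rewrite | github.com/takaria0/Hearvo-backend | Hearvo/apis/posts.py | distribute_year
-- ===== SOURCE A (Python) =====
-- def distribute_year(age_list):
--   result =   {
--     "0_9": 0,
--     "10_19": 0,
--     "20_29": 0,
--     "30_39": 0,
--     "40_49": 0,
--     "50_59": 0,
--     "60_69": 0,
--     "70_79": 0,
--     "80_89": 0,
--     "90_99": 0,
--     "100_109": 0,
--     "110_119": 0,
--   }
--
--   for age in age_list:
--     if 0 <= age <= 9:
--       result["0_9"] = result["0_9"] + 1
--     if 10 <= age <= 19:
--       result["10_19"] = result["10_19"] + 1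
--     if 20 <= age <= 29:
--       result["20_29"] = result["20_29"] + 1
--     if 30 <= age <= 39:
--       result["30_39"] = result["30_39"] + 1
--     if 40 <= age <= 49:
--       result["40_49"] = result["40_49"] + 1
--     if 50 <= age <= 59:
--       result["50_59"] = result["50_59"] + 1
--     if 60 <= age <= 69:
--       result["60_69"] = result["60_69"] + 1
--     if 70 <= age <= 79:
--       result["70_79"] = result["70_79"] + 1
--     if 80 <= age <= 89:
--       result["80_89"] = result["80_89"] + 1
--     if 90 <= age <= 99:
--       result["90_99"] = result["90_99"] + 1
--     if 100 <= age <= 109: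
--       result["100_109"] = result["100_109"] + 1
--     if 110 <= age <= 119:
--       result["110_119"] = result["110_119"] + 1
--
--   return result
-- ===== SOURCE B (Python) =====
-- def distribute_year(age_list):
--   counts = [0] * 12
--   for age in age_list:
--     i = age // 10
--     if 0 <= i < 12:
--       counts[i] += 1
--   return {f"{10*i}_{10*i+9}": counts[i] for i in range(12)}
-- ===== Notes on version B (the rewrite author's own statement) =====
-- stated objective: faster
-- what changed: Replaces the twelve hard-coded range tests and dict updates per age with a single floor-division bucket index into a 12-slot count list, rendering the dict once at the end from generated decade keys.
import Mathlib
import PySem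

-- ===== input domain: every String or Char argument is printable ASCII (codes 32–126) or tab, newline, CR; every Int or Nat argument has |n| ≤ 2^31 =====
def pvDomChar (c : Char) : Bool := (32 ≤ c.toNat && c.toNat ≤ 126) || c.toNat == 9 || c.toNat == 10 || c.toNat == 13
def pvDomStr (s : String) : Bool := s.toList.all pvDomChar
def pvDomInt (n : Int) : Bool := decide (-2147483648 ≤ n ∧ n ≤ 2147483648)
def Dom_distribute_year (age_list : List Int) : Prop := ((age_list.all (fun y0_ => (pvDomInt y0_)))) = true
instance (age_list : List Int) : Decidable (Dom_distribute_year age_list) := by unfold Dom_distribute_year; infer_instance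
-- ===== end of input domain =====

-- B replaces A's twelve range tests and dict updates per age by a single floor-division index into a count list (measured faster in a timing run).


-- ===== PORT A =====
-- one range test of A's loop body: 'if lo <= age <= hi: result[key] = result[key] + 1'
def bump (lo hi : Int) (key : String) (age : Int) (d : PySem.Dict String Int) : PySem.Dict String Int :=
  if lo ≤ age ∧ age ≤ hi then d.insert key (d.getD key 0 + 1) else d

-- one iteration of A's loop: the twelve independent range tests, in order
def aStep (d : PySem.Dict String Int) (age : Int) : PySem.Dict String Int :=
  let d := bump 0 9 "0_9" age d
  let d := bump 10 19 "10_19" age d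
  let d := bump 20 29 "20_29" age d
  let d := bump 30 39 "30_39" age d
  let d := bump 40 49 "40_49" age d
  let d := bump 50 59 "50_59" age d
  let d := bump 60 69 "60_69" age d
  let d := bump 70 79 "70_79" age d
  let d := bump 80 89 "80_89" age d
  let d := bump 90 99 "90_99" age d
  let d := bump 100 109 "100_109" age d
  let d := bump 110 119 "110_119" age d
  d

def distribute_year (age_list : List Int) : List (String × Int) :=
  let result := PySem.Dict.ofList [("0_9", (0:Int)), ("10_19", 0), ("20_29", 0), ("30_39", 0),
    ("40_49", 0), ("50_59", 0), ("60_69", 0), ("70_79", 0), ("80_89", 0), ("90_99", 0),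
    ("100_109", 0), ("110_119", 0)]
  (age_list.foldl aStep result).items

-- ===== PORT B =====
-- one iteration of B's loop: a single floor-division bucket index
def bStep (cs : List Int) (age : Int) : List Int :=
  let i := PySem.Int.floordiv age 10
  if 0 ≤ i ∧ i < 12 then cs.set i.toNat (cs.getD i.toNat 0 + 1) else cs

-- f"{10*i}_{10*i+9}"
def bKey (i : Int) : String := PySem.Int.toStr (10 * i) ++ "_" ++ PySem.Int.toStr (10 * i + 9)

def distribute_year_alt (age_list : List Int) : List (String × Int) :=
  let counts := age_list.foldl bStep (List.replicate 12 0)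
  (List.range 12).map (fun (i : Nat) => (bKey (i : Int), counts.getD i 0))

-- ===== PRECONDITION & SPEC =====
def Spec_distribute_year (age_list : List Int) (out : List (String × Int)) : Prop := out = distribute_year_alt age_list
instance (age_list : List Int) (out : List (String × Int)) : Decidable (Spec_distribute_year age_list out) := by unfold Spec_distribute_year; infer_instance

-- ===== CLAIM (what is proved, stated in full; the proofs are below) =====
def Claim_equal_distribute_year : Prop := ∀ (age_list : List Int), Dom_distribute_year age_list → Spec_distribute_year age_list (distribute_year age_list)

-- ===== LEMMAS AND PROOFS =====

def pvKeys : List String := ["0_9", "10_19", "20_29", "30_39", "40_49", "50_59",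
  "60_69", "70_79", "80_89", "90_99", "100_109", "110_119"]

theorem bump_neg (lo hi : Int) (key : String) (age : Int) (d : PySem.Dict String Int)
    (h : ¬(lo ≤ age ∧ age ≤ hi)) : bump lo hi key age d = d := if_neg h

theorem bump_pos (lo hi : Int) (key : String) (age : Int) (d : PySem.Dict String Int)
    (h : lo ≤ age ∧ age ≤ hi) : bump lo hi key age d = d.insert key (d.getD key 0 + 1) := if_pos h

-- one loop step: A's dict update on the rendered state equals rendering B's count update
theorem pv_step (age : Int) (cs : List Int) (h : cs.length = 12) :
    aStep (PySem.Dict.mk (pvKeys.zip cs)) age = PySem.Dict.mk (pvKeys.zip (bStep cs age)) := by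
  match cs, h with
  | [c0, c1, c2, c3, c4, c5, c6, c7, c8, c9, c10, c11], _ =>
  simp only [bStep]
  rw [PySem.Int.floordiv_eq_ediv_of_pos (show (0:Int) < 10 by norm_num)]
  by_cases hin : 0 ≤ age / 10 ∧ age / 10 < 12
  · obtain ⟨hq1, hq2⟩ := hin
    set q := age / 10 with hq
    interval_cases q
    · rw [if_pos (by norm_num : ((0:Int) ≤ 0 ∧ (0:Int) < 12))]
      show _ = PySem.Dict.mk (pvKeys.zip [c0 + 1, c1, c2, c3, c4, c5, c6, c7, c8, c9, c10, c11])
      simp only [aStep]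
      rw [bump_neg _ _ _ _ _ (by omega), bump_neg _ _ _ _ _ (by omega), bump_neg _ _ _ _ _ (by omega), bump_neg _ _ _ _ _ (by omega), bump_neg _ _ _ _ _ (by omega), bump_neg _ _ _ _ _ (by omega), bump_neg _ _ _ _ _ (by omega), bump_neg _ _ _ _ _ (by omega), bump_neg _ _ _ _ _ (by omega), bump_neg _ _ _ _ _ (by omega), bump_neg _ _ _ _ _ (by omega), bump_pos _ _ _ _ _ ⟨by omega, by omega⟩]
      simp [pvKeys, PySem.Dict.insert, PySem.Dict.getD, PySem.Dict.get?]
    · rw [if_pos (by norm_num : ((0:Int) ≤ 1 ∧ (1:Int) < 12))]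
      show _ = PySem.Dict.mk (pvKeys.zip [c0, c1 + 1, c2, c3, c4, c5, c6, c7, c8, c9, c10, c11])
      simp only [aStep]
      rw [bump_neg _ _ _ _ _ (by omega), bump_neg _ _ _ _ _ (by omega), bump_neg _ _ _ _ _ (by omega), bump_neg _ _ _ _ _ (by omega), bump_neg _ _ _ _ _ (by omega), bump_neg _ _ _ _ _ (by omega), bump_neg _ _ _ _ _ (by omega), bump_neg _ _ _ _ _ (by omega), bump_neg _ _ _ _ _ (by omega), bump_neg _ _ _ _ _ (by omega), bump_pos _ _ _ _ _ ⟨by omega, by omega⟩, bump_neg _ _ _ _ _ (by omega)]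
      simp [pvKeys, PySem.Dict.insert, PySem.Dict.getD, PySem.Dict.get?]
    · rw [if_pos (by norm_num : ((0:Int) ≤ 2 ∧ (2:Int) < 12))]
      show _ = PySem.Dict.mk (pvKeys.zip [c0, c1, c2 + 1, c3, c4, c5, c6, c7, c8, c9, c10, c11])
      simp only [aStep]
      rw [bump_neg _ _ _ _ _ (by omega), bump_neg _ _ _ _ _ (by omega), bump_neg _ _ _ _ _ (by omega), bump_neg _ _ _ _ _ (by omega), bump_neg _ _ _ _ _ (by omega), bump_neg _ _ _ _ _ (by omega), bump_neg _ _ _ _ _ (by omega), bump_neg _ _ _ _ _ (by omega), bump_neg _ _ _ _ _ (by omega), bump_pos _ _ _ _ _ ⟨by omega, by omega⟩, bump_neg _ _ _ _ _ (by omega), bump_neg _ _ _ _ _ (by omega)]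
      simp [pvKeys, PySem.Dict.insert, PySem.Dict.getD, PySem.Dict.get?]
    · rw [if_pos (by norm_num : ((0:Int) ≤ 3 ∧ (3:Int) < 12))]
      show _ = PySem.Dict.mk (pvKeys.zip [c0, c1, c2, c3 + 1, c4, c5, c6, c7, c8, c9, c10, c11])
      simp only [aStep]
      rw [bump_neg _ _ _ _ _ (by omega), bump_neg _ _ _ _ _ (by omega), bump_neg _ _ _ _ _ (by omega), bump_neg _ _ _ _ _ (by omega), bump_neg _ _ _ _ _ (by omega), bump_neg _ _ _ _ _ (by omega), bump_neg _ _ _ _ _ (by omega), bump_neg _ _ _ _ _ (by omega), bump_pos _ _ _ _ _ ⟨by omega, by omega⟩, bump_neg _ _ _ _ _ (by omega), bump_neg _ _ _ _ _ (by omega), bump_neg _ _ _ _ _ (by omega)]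
      simp [pvKeys, PySem.Dict.insert, PySem.Dict.getD, PySem.Dict.get?]
    · rw [if_pos (by norm_num : ((0:Int) ≤ 4 ∧ (4:Int) < 12))]
      show _ = PySem.Dict.mk (pvKeys.zip [c0, c1, c2, c3, c4 + 1, c5, c6, c7, c8, c9, c10, c11])
      simp only [aStep]
      rw [bump_neg _ _ _ _ _ (by omega), bump_neg _ _ _ _ _ (by omega), bump_neg _ _ _ _ _ (by omega), bump_neg _ _ _ _ _ (by omega), bump_neg _ _ _ _ _ (by omega), bump_neg _ _ _ _ _ (by omega), bump_neg _ _ _ _ _ (by omega), bump_pos _ _ _ _ _ ⟨by omega, by omega⟩, bump_neg _ _ _ _ _ (by omega), bump_neg _ _ _ _ _ (by omega), bump_neg _ _ _ _ _ (by omega), bump_neg _ _ _ _ _ (by omega)]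
      simp [pvKeys, PySem.Dict.insert, PySem.Dict.getD, PySem.Dict.get?]
    · rw [if_pos (by norm_num : ((0:Int) ≤ 5 ∧ (5:Int) < 12))]
      show _ = PySem.Dict.mk (pvKeys.zip [c0, c1, c2, c3, c4, c5 + 1, c6, c7, c8, c9, c10, c11])
      simp only [aStep]
      rw [bump_neg _ _ _ _ _ (by omega), bump_neg _ _ _ _ _ (by omega), bump_neg _ _ _ _ _ (by omega), bump_neg _ _ _ _ _ (by omega), bump_neg _ _ _ _ _ (by omega), bump_neg _ _ _ _ _ (by omega), bump_pos _ _ _ _ _ ⟨by omega, by omega⟩, bump_neg _ _ _ _ _ (by omega), bump_neg _ _ _ _ _ (by omega), bump_neg _ _ _ _ _ (by omega), bump_neg _ _ _ _ _ (by omega), bump_neg _ _ _ _ _ (by omega)]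
      simp [pvKeys, PySem.Dict.insert, PySem.Dict.getD, PySem.Dict.get?]
    · rw [if_pos (by norm_num : ((0:Int) ≤ 6 ∧ (6:Int) < 12))]
      show _ = PySem.Dict.mk (pvKeys.zip [c0, c1, c2, c3, c4, c5, c6 + 1, c7, c8, c9, c10, c11])
      simp only [aStep]
      rw [bump_neg _ _ _ _ _ (by omega), bump_neg _ _ _ _ _ (by omega), bump_neg _ _ _ _ _ (by omega), bump_neg _ _ _ _ _ (by omega), bump_neg _ _ _ _ _ (by omega), bump_pos _ _ _ _ _ ⟨by omega, by omega⟩, bump_neg _ _ _ _ _ (by omega), bump_neg _ _ _ _ _ (by omega), bump_neg _ _ _ _ _ (by omega), bump_neg _ _ _ _ _ (by omega), bump_neg _ _ _ _ _ (by omega), bump_neg _ _ _ _ _ (by omega)]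
      simp [pvKeys, PySem.Dict.insert, PySem.Dict.getD, PySem.Dict.get?]
    · rw [if_pos (by norm_num : ((0:Int) ≤ 7 ∧ (7:Int) < 12))]
      show _ = PySem.Dict.mk (pvKeys.zip [c0, c1, c2, c3, c4, c5, c6, c7 + 1, c8, c9, c10, c11])
      simp only [aStep]
      rw [bump_neg _ _ _ _ _ (by omega), bump_neg _ _ _ _ _ (by omega), bump_neg _ _ _ _ _ (by omega), bump_neg _ _ _ _ _ (by omega), bump_pos _ _ _ _ _ ⟨by omega, by omega⟩, bump_neg _ _ _ _ _ (by omega), bump_neg _ _ _ _ _ (by omega), bump_neg _ _ _ _ _ (by omega), bump_neg _ _ _ _ _ (by omega), bump_neg _ _ _ _ _ (by omega), bump_neg _ _ _ _ _ (by omega), bump_neg _ _ _ _ _ (by omega)]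
      simp [pvKeys, PySem.Dict.insert, PySem.Dict.getD, PySem.Dict.get?]
    · rw [if_pos (by norm_num : ((0:Int) ≤ 8 ∧ (8:Int) < 12))]
      show _ = PySem.Dict.mk (pvKeys.zip [c0, c1, c2, c3, c4, c5, c6, c7, c8 + 1, c9, c10, c11])
      simp only [aStep]
      rw [bump_neg _ _ _ _ _ (by omega), bump_neg _ _ _ _ _ (by omega), bump_neg _ _ _ _ _ (by omega), bump_pos _ _ _ _ _ ⟨by omega, by omega⟩, bump_neg _ _ _ _ _ (by omega), bump_neg _ _ _ _ _ (by omega), bump_neg _ _ _ _ _ (by omega), bump_neg _ _ _ _ _ (by omega), bump_neg _ _ _ _ _ (by omega), bump_neg _ _ _ _ _ (by omega), bump_neg _ _ _ _ _ (by omega), bump_neg _ _ _ _ _ (by omega)]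
      simp [pvKeys, PySem.Dict.insert, PySem.Dict.getD, PySem.Dict.get?]
    · rw [if_pos (by norm_num : ((0:Int) ≤ 9 ∧ (9:Int) < 12))]
      show _ = PySem.Dict.mk (pvKeys.zip [c0, c1, c2, c3, c4, c5, c6, c7, c8, c9 + 1, c10, c11])
      simp only [aStep]
      rw [bump_neg _ _ _ _ _ (by omega), bump_neg _ _ _ _ _ (by omega), bump_pos _ _ _ _ _ ⟨by omega, by omega⟩, bump_neg _ _ _ _ _ (by omega), bump_neg _ _ _ _ _ (by omega), bump_neg _ _ _ _ _ (by omega), bump_neg _ _ _ _ _ (by omega), bump_neg _ _ _ _ _ (by omega), bump_neg _ _ _ _ _ (by omega), bump_neg _ _ _ _ _ (by omega), bump_neg _ _ _ _ _ (by omega), bump_neg _ _ _ _ _ (by omega)]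
      simp [pvKeys, PySem.Dict.insert, PySem.Dict.getD, PySem.Dict.get?]
    · rw [if_pos (by norm_num : ((0:Int) ≤ 10 ∧ (10:Int) < 12))]
      show _ = PySem.Dict.mk (pvKeys.zip [c0, c1, c2, c3, c4, c5, c6, c7, c8, c9, c10 + 1, c11])
      simp only [aStep]
      rw [bump_neg _ _ _ _ _ (by omega), bump_pos _ _ _ _ _ ⟨by omega, by omega⟩, bump_neg _ _ _ _ _ (by omega), bump_neg _ _ _ _ _ (by omega), bump_neg _ _ _ _ _ (by omega), bump_neg _ _ _ _ _ (by omega), bump_neg _ _ _ _ _ (by omega), bump_neg _ _ _ _ _ (by omega), bump_neg _ _ _ _ _ (by omega), bump_neg _ _ _ _ _ (by omega), bump_neg _ _ _ _ _ (by omega), bump_neg _ _ _ _ _ (by omega)]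
      simp [pvKeys, PySem.Dict.insert, PySem.Dict.getD, PySem.Dict.get?]
    · rw [if_pos (by norm_num : ((0:Int) ≤ 11 ∧ (11:Int) < 12))]
      show _ = PySem.Dict.mk (pvKeys.zip [c0, c1, c2, c3, c4, c5, c6, c7, c8, c9, c10, c11 + 1])
      simp only [aStep]
      rw [bump_pos _ _ _ _ _ ⟨by omega, by omega⟩, bump_neg _ _ _ _ _ (by omega), bump_neg _ _ _ _ _ (by omega), bump_neg _ _ _ _ _ (by omega), bump_neg _ _ _ _ _ (by omega), bump_neg _ _ _ _ _ (by omega), bump_neg _ _ _ _ _ (by omega), bump_neg _ _ _ _ _ (by omega), bump_neg _ _ _ _ _ (by omega), bump_neg _ _ _ _ _ (by omega), bump_neg _ _ _ _ _ (by omega), bump_neg _ _ _ _ _ (by omega)]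
      simp [pvKeys, PySem.Dict.insert, PySem.Dict.getD, PySem.Dict.get?]
  · rw [if_neg hin]
    simp only [aStep]
    rw [bump_neg _ _ _ _ _ (by omega), bump_neg _ _ _ _ _ (by omega), bump_neg _ _ _ _ _ (by omega), bump_neg _ _ _ _ _ (by omega), bump_neg _ _ _ _ _ (by omega), bump_neg _ _ _ _ _ (by omega), bump_neg _ _ _ _ _ (by omega), bump_neg _ _ _ _ _ (by omega), bump_neg _ _ _ _ _ (by omega), bump_neg _ _ _ _ _ (by omega), bump_neg _ _ _ _ _ (by omega), bump_neg _ _ _ _ _ (by omega)]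

theorem bStep_length (cs : List Int) (age : Int) : (bStep cs age).length = cs.length := by
  simp only [bStep]; split <;> simp

theorem pv_fold (l : List Int) : ∀ cs : List Int, cs.length = 12 →
    l.foldl aStep (PySem.Dict.mk (pvKeys.zip cs)) = PySem.Dict.mk (pvKeys.zip (l.foldl bStep cs)) := by
  induction l with
  | nil => intro cs _; rfl
  | cons a l ih =>
      intro cs h
      simp only [List.foldl_cons, pv_step a cs h]
      exact ih (bStep cs a) (by rw [bStep_length, h])

theorem pv_fold_length (l : List Int) : ∀ cs : List Int, (l.foldl bStep cs).length = cs.length := by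
  induction l with
  | nil => intro cs; rfl
  | cons a l ih => intro cs; rw [List.foldl_cons, ih, bStep_length]

-- rendering: zipping the fixed key list equals B's range-12 comprehension with generated keys
theorem pv_render (cs : List Int) (h : cs.length = 12) :
    pvKeys.zip cs = (List.range 12).map (fun (i : Nat) => (bKey (i : Int), cs.getD i 0)) := by
  match cs, h with
  | [c0, c1, c2, c3, c4, c5, c6, c7, c8, c9, c10, c11], _ => rfl

-- ===== VERDICT (by name: the statement is the Claim_ definition above) =====
theorem distribute_year_spec : Claim_equal_distribute_year := by
  intro l _
  show distribute_year l = distribute_year_alt l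
  unfold distribute_year distribute_year_alt
  have h0 : PySem.Dict.ofList [("0_9", (0:Int)), ("10_19", 0), ("20_29", 0), ("30_39", 0),
      ("40_49", 0), ("50_59", 0), ("60_69", 0), ("70_79", 0), ("80_89", 0), ("90_99", 0),
      ("100_109", 0), ("110_119", 0)] = PySem.Dict.mk (pvKeys.zip (List.replicate 12 0)) := by decide
  simp only [h0]
  rw [pv_fold l (List.replicate 12 0) (by decide)]
  exact pv_render _ (by rw [pv_fold_length]; rfl)
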